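-- pv_equiv track=rewrite | github.com/alekpinel/CodeChallenge1 | Challenge 11/Challenge11.py | calculateMaxScore
-- ===== SOURCE A (Python) =====
-- def calculateMaxScore(distances, K):
--     N = len(distances)
--     if (N < K):
--         return 0
--
--     if (N == K):
--         return min(distances[:K-1])
--
--     min_distance = min(distances[:-1])
--
--     min_index = distances.index(min_distance)
--     left = distances[:min_index + 1]
--     right = distances[min_index + 1:]
--
--     n_groups = N//K
--     left_groups = len(left) // K
--     right_groups = len(right) // K
--     groups_to_fit = n_groups - left_groups - right_groups
--
--     if (groups_to_fit > 1):
--         raise ValueError('More than 1 group to fit')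
--
--     score = groups_to_fit * min_distance
--
--     score += calculateMaxScore(left, K)
--     score += calculateMaxScore(right, K)
--
--     return score
-- ===== SOURCE B (Python) =====
-- def calculateMaxScore(distances, K):
--     # Iterative worklist version: pop a subarray, score it, push its two halves.
--     score = 0
--     stack = [distances]
--     while stack:
--         sub = stack.pop()
--         n = len(sub)
--         if n < K:
--             continue
--         if n == K:
--             score += min(sub[:K - 1])
--             continue
--         m = min(sub[:-1])
--         i = sub.index(m)
--         left = sub[:i + 1]
--         right = sub[i + 1:]
--         score += (n // K - len(left) // K - len(right) // K) * m
--         stack.append(left)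
--         stack.append(right)
--     return score
-- ===== Notes on version B (the rewrite author's own statement) =====
-- stated objective: alternative
-- what changed: A's binary recursion (recurse on left and right halves around the minimum) is replaced by an iterative worklist: a loop pops subarrays off an explicit stack, adds each node's contribution to a running score, and pushes the two halves; B also drops A's 'More than 1 group to fit' raise, which is provably unreachable (floor division is superadditive up to 1).
import Mathlib
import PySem

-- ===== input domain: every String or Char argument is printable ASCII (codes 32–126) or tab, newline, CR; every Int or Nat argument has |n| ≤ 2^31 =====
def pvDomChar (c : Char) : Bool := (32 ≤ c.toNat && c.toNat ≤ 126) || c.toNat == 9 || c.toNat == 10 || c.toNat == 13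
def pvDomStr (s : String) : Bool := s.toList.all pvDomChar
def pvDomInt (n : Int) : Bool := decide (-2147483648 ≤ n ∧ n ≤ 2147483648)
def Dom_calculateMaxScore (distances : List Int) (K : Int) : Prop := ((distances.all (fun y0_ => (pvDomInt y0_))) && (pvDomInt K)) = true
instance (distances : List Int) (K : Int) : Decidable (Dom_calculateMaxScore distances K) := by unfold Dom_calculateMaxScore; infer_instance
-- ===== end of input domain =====

-- B replaces A's binary recursion by an iterative worklist (explicit stack of subarrays)
-- with a running score accumulator; objective: alternative decomposition, same cost.

-- ===== PORT A =====
-- literal transliteration of A; the two 0-returns marked "raise" are where Python raises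
-- (min of an empty slice / ZeroDivisionError), excluded by Pre_; the dite is a totality guard.
def calculateMaxScore (distances : List Int) (K : Int) : Int :=
  let N : Int := PySem.List.len distances
  if N < K then 0
  else if N = K then
    (PySem.List.min? (PySem.List.slice distances none (some (K - 1))) (fun x => x)).getD 0  -- getD 0: min([]) raises, excluded by Pre_
  else
    match PySem.List.min? (PySem.List.slice distances none (some (-1))) (fun x => x) with
    | none => 0  -- Python raises ValueError(min of empty); excluded by Pre_
    | some min_distance =>
      match PySem.List.index? distances min_distance with
      | none => 0  -- unreachable: min_distance ∈ distances
      | some min_index =>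
        let left := PySem.List.slice distances none (some ((min_index : Int) + 1))
        let right := PySem.List.slice distances (some ((min_index : Int) + 1)) none
        let groups_to_fit := PySem.Int.floordiv N K - PySem.Int.floordiv (PySem.List.len left) K
            - PySem.Int.floordiv (PySem.List.len right) K
        if 1 < groups_to_fit then 0  -- Python: raise ValueError('More than 1 group to fit')
        else if h : left.length < distances.length ∧ right.length < distances.length then
          groups_to_fit * min_distance + calculateMaxScore left K + calculateMaxScore right K
        else 0  -- totality guard, never reached
termination_by distances.length
decreasing_by
  · exact h.1
  · exact h.2

-- ===== PORT B =====
-- measure lemma used only for B's termination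
theorem pvPow3_lt {l r n : Nat} (hl : l < n) (hr : r < n) : 3 ^ r + 3 ^ l < 3 ^ n := by
  have h1 : 3 ^ r ≤ 3 ^ (n - 1) := Nat.pow_le_pow_right (by norm_num) (by omega)
  have h2 : 3 ^ l ≤ 3 ^ (n - 1) := Nat.pow_le_pow_right (by norm_num) (by omega)
  have h3 : 3 ^ n = 3 * 3 ^ (n - 1) := by
    rw [← Nat.pow_succ']
    congr 1
    omega
  have h4 : 0 < 3 ^ (n - 1) := Nat.pow_pos (by norm_num)
  omega

-- the worklist loop of Source B: pop a subarray, add its contribution, push its halves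
def pvGoB (K : Int) (stack : List (List Int)) (score : Int) : Int :=
  match stack with
  | [] => score
  | sub :: rest =>
    let n : Int := PySem.List.len sub
    if n < K then pvGoB K rest score
    else if n = K then
      pvGoB K rest (score + (PySem.List.min? (PySem.List.slice sub none (some (K - 1))) (fun x => x)).getD 0)
    else
      match PySem.List.min? (PySem.List.slice sub none (some (-1))) (fun x => x) with
      | none => pvGoB K rest score  -- Python raises here; excluded by Pre_
      | some m =>
        match PySem.List.index? sub m with
        | none => pvGoB K rest score  -- unreachable: m ∈ sub
        | some i =>
          let g := PySem.Int.floordiv n K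
              - PySem.Int.floordiv (PySem.List.len (PySem.List.slice sub none (some ((i : Int) + 1)))) K
              - PySem.Int.floordiv (PySem.List.len (PySem.List.slice sub (some ((i : Int) + 1)) none)) K
          if h : (PySem.List.slice sub none (some ((i : Int) + 1))).length < sub.length ∧
              (PySem.List.slice sub (some ((i : Int) + 1)) none).length < sub.length then
            pvGoB K (PySem.List.slice sub (some ((i : Int) + 1)) none ::
              PySem.List.slice sub none (some ((i : Int) + 1)) :: rest) (score + g * m)  -- push left then right; pop takes right first
          else pvGoB K rest (score + g * m)  -- totality guard, never reached
termination_by (stack.map (fun s => 3 ^ s.length)).sum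
decreasing_by
  all_goals simp only [List.map_cons, List.sum_cons]
  all_goals first
    | (have := pvPow3_lt h.1 h.2; omega)
    | (have : 0 < 3 ^ sub.length := Nat.pow_pos (by norm_num); omega)

def calculateMaxScore_alt (distances : List Int) (K : Int) : Int :=
  pvGoB K [distances] 0

-- ===== PRECONDITION & SPEC =====
-- Pre_ excludes exactly the inputs on which Python A raises: K ≤ 0 (ZeroDivisionError at
-- N//K, or min of an empty slice) and K = 1 with a nonempty list (min(sub[:0]) at the base
-- case); A returns normally iff K ≥ 2 or len(distances) < K.
def Pre_calculateMaxScore (distances : List Int) (K : Int) : Prop :=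
  2 ≤ K ∨ (distances.length : Int) < K
instance (distances : List Int) (K : Int) : Decidable (Pre_calculateMaxScore distances K) := by
  unfold Pre_calculateMaxScore; infer_instance

def pvWitness_calculateMaxScore : List Int × Int := ([5, 1, 7, 3, 2, 8], 3)

def Spec_calculateMaxScore (distances : List Int) (K : Int) (out : Int) : Prop := out = calculateMaxScore_alt distances K
instance (distances : List Int) (K : Int) (out : Int) : Decidable (Spec_calculateMaxScore distances K out) := by unfold Spec_calculateMaxScore; infer_instance

-- ===== CLAIM (what is proved, stated in full; the proofs are below) =====
def Claim_equal_calculateMaxScore : Prop := ∀ (distances : List Int) (K : Int), Dom_calculateMaxScore distances K → Pre_calculateMaxScore distances K → Spec_calculateMaxScore distances K (calculateMaxScore distances K)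

-- ===== LEMMAS AND PROOFS =====

-- floor division is superadditive up to 1 (so A's ValueError branch is unreachable)
theorem pvFdiv_le (l r K : Int) :
    PySem.Int.floordiv (l + r) K ≤ PySem.Int.floordiv l K + PySem.Int.floordiv r K + 1 := by
  by_cases hK : K = 0
  · simp [hK, PySem.Int.floordiv]
  have h1 := PySem.Int.floordiv_mul_add_mod (l + r) K
  have h2 := PySem.Int.floordiv_mul_add_mod l K
  have h3 := PySem.Int.floordiv_mul_add_mod r K
  set qn := PySem.Int.floordiv (l + r) K
  set ql := PySem.Int.floordiv l K
  set qr := PySem.Int.floordiv r K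
  rcases lt_or_gt_of_ne hK with hneg | hpos
  · have b1 := PySem.Int.mod_neg_bounds (l + r) hneg
    have b2 := PySem.Int.mod_neg_bounds l hneg
    have b3 := PySem.Int.mod_neg_bounds r hneg
    by_contra hc
    have hd : ql + qr + 2 ≤ qn := by omega
    nlinarith
  · have b1 : 0 ≤ PySem.Int.mod (l + r) K := PySem.Int.mod_nonneg _ hpos
    have b1' : PySem.Int.mod (l + r) K < K := PySem.Int.mod_lt _ hpos
    have b2 : 0 ≤ PySem.Int.mod l K := PySem.Int.mod_nonneg _ hpos
    have b2' : PySem.Int.mod l K < K := PySem.Int.mod_lt _ hpos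
    have b3 : 0 ≤ PySem.Int.mod r K := PySem.Int.mod_nonneg _ hpos
    have b3' : PySem.Int.mod r K < K := PySem.Int.mod_lt _ hpos
    by_contra hc
    have hd : ql + qr + 2 ≤ qn := by omega
    nlinarith

-- the first index of min(sub[:-1]) is never the last position, so both halves are shorter
theorem pvGuard (sub : List Int) (m : Int) (i : Nat)
    (hm : PySem.List.min? (PySem.List.slice sub none (some (-1))) (fun x => x) = some m)
    (hi : PySem.List.index? sub m = some i) : i + 1 < sub.length := by
  rw [PySem.List.slice_to_neg_one] at hm
  have hmem : m ∈ sub.dropLast := PySem.List.min?_mem hm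
  rw [PySem.List.index?_eq_some_iff] at hi
  obtain ⟨pre, suf, hsub, hlen, hnot⟩ := hi
  rcases suf.eq_nil_or_concat with hs | ⟨t, x, ht⟩
  · subst hs
    rw [hsub] at hmem
    simp at hmem
    exact absurd hmem hnot
  · subst ht
    simp [hsub]
    omega

theorem pvSliceLeft_len (sub : List Int) (i : Nat) (h : i + 1 ≤ sub.length) :
    (PySem.List.slice sub none (some ((i : Int) + 1))).length = i + 1 := by
  have hc : ((i : Int) + 1) = (((i + 1 : Nat)) : Int) := by push_cast; ring
  rw [hc, PySem.List.slice_to_natCast]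
  simp
  omega

theorem pvSliceRight_len (sub : List Int) (i : Nat) :
    (PySem.List.slice sub (some ((i : Int) + 1)) none).length = sub.length - (i + 1) := by
  have hc : ((i : Int) + 1) = (((i + 1 : Nat)) : Int) := by push_cast; ring
  rw [hc, PySem.List.slice_from_natCast]
  simp

-- the loop processes the top of the stack exactly as A scores that subarray
theorem pvGoB_cons_aux (K : Int) (N : Nat) : ∀ (sub : List Int), sub.length < N →
    ∀ (rest : List (List Int)) (score : Int),
    pvGoB K (sub :: rest) score = pvGoB K rest (score + calculateMaxScore sub K) := by
  induction N with
  | zero => intro sub h; omega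
  | succ N ih =>
    intro sub hlen rest score
    rw [pvGoB.eq_def, calculateMaxScore.eq_def]
    by_cases h1 : PySem.List.len sub < K
    · simp only [if_pos h1]
      rw [add_zero]
    by_cases h2 : PySem.List.len sub = K
    · simp only [if_neg h1, if_pos h2]
    simp only [if_neg h1, if_neg h2]
    cases hm : PySem.List.min? (PySem.List.slice sub none (some (-1))) (fun x => x) with
    | none => simp only [add_zero]
    | some m =>
      cases hi : PySem.List.index? sub m with
      | none => simp only [hi, add_zero]
      | some i =>
        have hg : i + 1 < sub.length := pvGuard sub m i hm hi
        have hL := pvSliceLeft_len sub i (by omega)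
        have hR := pvSliceRight_len sub i
        have hlt : (PySem.List.slice sub none (some ((i : Int) + 1))).length < sub.length ∧
            (PySem.List.slice sub (some ((i : Int) + 1)) none).length < sub.length := by
          constructor <;> omega
        have hsum : PySem.List.len sub =
            PySem.List.len (PySem.List.slice sub none (some ((i : Int) + 1))) +
            PySem.List.len (PySem.List.slice sub (some ((i : Int) + 1)) none) := by
          simp only [PySem.List.len_eq, hL, hR]
          omega
        have hle := pvFdiv_le (PySem.List.len (PySem.List.slice sub none (some ((i : Int) + 1))))
          (PySem.List.len (PySem.List.slice sub (some ((i : Int) + 1)) none)) K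
        rw [← hsum] at hle
        have hng : ¬ (1 < PySem.Int.floordiv (PySem.List.len sub) K
            - PySem.Int.floordiv (PySem.List.len (PySem.List.slice sub none (some ((i : Int) + 1)))) K
            - PySem.Int.floordiv (PySem.List.len (PySem.List.slice sub (some ((i : Int) + 1)) none)) K) := by
          omega
        simp only [hi, if_neg hng, dif_pos hlt]
        rw [ih _ (by omega), ih _ (by omega)]
        congr 1
        ring

theorem pvGoB_cons (K : Int) (sub : List Int) (rest : List (List Int)) (score : Int) :
    pvGoB K (sub :: rest) score = pvGoB K rest (score + calculateMaxScore sub K) :=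
  pvGoB_cons_aux K (sub.length + 1) sub (by omega) rest score

-- ===== VERDICT (by name: the statement is the Claim_ definition above) =====
theorem calculateMaxScore_spec : Claim_equal_calculateMaxScore := by
  intro distances K _ _
  unfold Spec_calculateMaxScore calculateMaxScore_alt
  rw [pvGoB_cons]
  conv_rhs => rw [pvGoB.eq_def]
  simp
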